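-- pv_equiv track=rewrite | github.com/hypergraphman/ArturEGE23 | task5/240.py | f
-- ===== SOURCE A (Python) =====
-- def f(n):
--     res = ''
--     for d in str(n):
--         res += f'{int(d):4b}'
--     res = res.replace('0', ' ')
--     res = res.replace('1', '0')
--     res = res.replace(' ', '1')
--     return int(res, 2)
-- ===== SOURCE B (Python) =====
-- def f(n):
--     # each digit d contributes the 4-bit complement 15-d; concatenating 4-bit
--     # fields and reading as binary is base-16 accumulation
--     result = 0
--     for d in str(n):
--         result = result * 16 + (15 - int(d))
--     return result
-- ===== Notes on version B (the rewrite author's own statement) =====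
-- stated objective: simpler
-- what changed: B drops the binary-string building, the three replace passes and the int(s,2) parse: each digit d contributes the 4-bit complement 15-d, so B accumulates result = result*16 + (15 - int(d)) directly over the digits.
import Mathlib
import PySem

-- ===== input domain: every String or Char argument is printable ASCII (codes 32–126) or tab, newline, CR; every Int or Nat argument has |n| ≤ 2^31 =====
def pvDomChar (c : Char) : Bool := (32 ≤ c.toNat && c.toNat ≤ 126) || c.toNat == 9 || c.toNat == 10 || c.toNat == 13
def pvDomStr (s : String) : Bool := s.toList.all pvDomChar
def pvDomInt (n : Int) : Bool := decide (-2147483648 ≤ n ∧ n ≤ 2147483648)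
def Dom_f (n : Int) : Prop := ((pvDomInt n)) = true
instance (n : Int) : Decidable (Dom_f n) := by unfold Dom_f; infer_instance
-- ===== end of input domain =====

-- B replaces A's binary-string building / replace chain / int(·,2) parse by direct
-- base-16 accumulation of the 4-bit digit complements 15-d (objective: simpler).

-- int(d) for a single character d (ValueError → none; 0 default is unreachable under Pre_f)
def pvVal (c : Char) : Int := (PySem.Int.ofChars? [c]).getD 0

-- ===== PORT A =====
-- f'{v:4b}': binary digits (format(v,'b') = PySem.Int.toBinChars), left-padded with spaces to width 4
def pvFmtB4 (v : Int) : List Char :=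
  List.replicate (4 - (PySem.Int.toBinChars v).length) ' ' ++ PySem.Int.toBinChars v

def pvPStep (a : Int) (c : Char) : Int := 2 * a + (if c = '1' then 1 else 0)

-- int(res, 2), ported by hand: exact on nonempty strings of '0'/'1' characters, which is
-- the only form res takes when A returns (the whitespace/sign/'0b'-prefix/underscore
-- cases of full int(·, 2) are unreachable there)
def pvParseBin2 (cs : List Char) : Int := cs.foldl pvPStep 0

def f (n : Int) : Int :=
  let res0 := (PySem.Int.toChars n).foldl (fun r d => r ++ pvFmtB4 (pvVal d)) []
  let res1 := PySem.Chars.replace res0 ['0'] [' ']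
  let res2 := PySem.Chars.replace res1 ['1'] ['0']
  let res3 := PySem.Chars.replace res2 [' '] ['1']
  pvParseBin2 res3

-- ===== PORT B =====
def f_alt (n : Int) : Int :=
  (PySem.Int.toChars n).foldl (fun acc d => acc * 16 + (15 - pvVal d)) 0

-- ===== PRECONDITION & SPEC =====
-- Pre_f: A raises ValueError (int('-')) on negative n; it returns on every n ≥ 0.
def Pre_f (n : Int) : Prop := 0 ≤ n
instance (n : Int) : Decidable (Pre_f n) := by unfold Pre_f; infer_instance
def pvWitness_f : Int := 507
def Spec_f (n : Int) (out : Int) : Prop := out = f_alt n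
instance (n : Int) (out : Int) : Decidable (Spec_f n out) := by unfold Spec_f; infer_instance

-- ===== CLAIM (what is proved, stated in full; the proofs are below) =====
def Claim_equal_f : Prop := ∀ (n : Int), Dom_f n → Pre_f n → Spec_f n (f n)

-- ===== LEMMAS AND PROOFS =====

def pvDigits : List Char := ['0', '1', '2', '3', '4', '5', '6', '7', '8', '9']

-- str.replace with a one-character pattern is a character map
lemma pv_go_single (a b : Char) : ∀ (fuel : Nat) (l acc : List Char), l.length ≤ fuel →
    PySem.Chars.replace.go [a] [b] fuel l acc =
      acc.reverse ++ l.map (fun c => if c = a then b else c) := by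
  intro fuel
  induction fuel with
  | zero =>
    intro l acc h
    have : l = [] := List.eq_nil_of_length_eq_zero (Nat.le_zero.mp h)
    subst this; simp [PySem.Chars.replace.go]
  | succ fl ih =>
    intro l acc h
    cases l with
    | nil => simp [PySem.Chars.replace.go]
    | cons c t =>
      rw [PySem.Chars.replace.go]
      by_cases hc : c = a
      · subst hc
        have hpre : [c].isPrefixOf (c :: t) = true := by simp [List.isPrefixOf]
        rw [if_pos hpre]
        have hdrop : List.drop [c].length (c :: t) = t := by simp
        rw [hdrop, ih t _ (by simpa using h)]
        simp
      · have hpre : ¬ [a].isPrefixOf (c :: t) = true := by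
          simp [List.isPrefixOf]; exact fun h' => hc h'.symm
        rw [if_neg hpre, ih t _ (by simpa using h)]
        simp [hc]

lemma pv_replace_single (a b : Char) (cs : List Char) :
    PySem.Chars.replace cs [a] [b] = cs.map (fun c => if c = a then b else c) := by
  rw [PySem.Chars.replace]
  simp only [List.isEmpty_cons, Bool.false_eq_true, if_false]
  rw [pv_go_single a b cs.length cs [] le_rfl]
  simp

-- every character produced by Nat.toDigits 10 is a decimal digit
lemma pv_mem_toDigitsCore : ∀ (fuel n : Nat) (acc : List Char),
    (∀ c ∈ acc, c ∈ pvDigits) → ∀ c ∈ Nat.toDigitsCore 10 fuel n acc, c ∈ pvDigits := by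
  intro fuel
  induction fuel with
  | zero => intro n acc hacc c hc; rw [Nat.toDigitsCore] at hc; exact hacc c hc
  | succ fl ih =>
    intro n acc hacc c hc
    have hd : Nat.digitChar (n % 10) ∈ pvDigits := by
      have h10 : n % 10 < 10 := Nat.mod_lt _ (by norm_num)
      set k := n % 10 with hk
      interval_cases k <;> decide
    rw [Nat.toDigitsCore] at hc
    by_cases h0 : n / 10 = 0
    · rw [if_pos h0] at hc
      rcases List.mem_cons.mp hc with h | h
      · exact h ▸ hd
      · exact hacc c h
    · rw [if_neg h0] at hc
      refine ih _ _ ?_ c hc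
      intro x hx
      rcases List.mem_cons.mp hx with h | h
      · exact h ▸ hd
      · exact hacc x h

-- shifting lemma for the binary parse
lemma pv_pstep_shift (l : List Char) : ∀ a : Int,
    List.foldl pvPStep a l = a * 2 ^ l.length + List.foldl pvPStep 0 l := by
  induction l with
  | nil => intro a; simp
  | cons c t ih =>
    intro a
    simp only [List.foldl_cons, List.length_cons]
    rw [ih (pvPStep a c), ih (pvPStep 0 c)]
    simp only [pvPStep]
    ring

-- one digit's 4-character field, after the three replaces, parses to 15 - d
lemma pv_block (c : Char) (hc : c ∈ pvDigits) (a : Int) :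
    List.foldl pvPStep a
      ((pvFmtB4 (pvVal c)).map
        (((fun x => if x = ' ' then '1' else x) ∘ (fun x => if x = '1' then '0' else x)) ∘
          (fun x => if x = '0' then ' ' else x))) = a * 16 + (15 - pvVal c) := by
  have h : List.foldl pvPStep 0
      ((pvFmtB4 (pvVal c)).map
        (((fun x => if x = ' ' then '1' else x) ∘ (fun x => if x = '1' then '0' else x)) ∘
          (fun x => if x = '0' then ' ' else x))) = 15 - pvVal c ∧
      ((pvFmtB4 (pvVal c)).map
        (((fun x => if x = ' ' then '1' else x) ∘ (fun x => if x = '1' then '0' else x)) ∘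
          (fun x => if x = '0' then ' ' else x))).length = 4 := by
    fin_cases hc <;> exact ⟨by decide, by decide⟩
  rw [pv_pstep_shift, h.2, h.1]
  ring

-- the concatenation of the transformed fields parses to the base-16 accumulation
lemma pv_main (cs : List Char) (h : ∀ c ∈ cs, c ∈ pvDigits) : ∀ a : Int,
    List.foldl pvPStep a
      (cs.flatMap (fun d =>
        (pvFmtB4 (pvVal d)).map
          (((fun x => if x = ' ' then '1' else x) ∘ (fun x => if x = '1' then '0' else x)) ∘
            (fun x => if x = '0' then ' ' else x)))) =
    List.foldl (fun acc d => acc * 16 + (15 - pvVal d)) a cs := by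
  induction cs with
  | nil => intro a; rfl
  | cons c t ih =>
    intro a
    simp only [List.flatMap_cons, List.foldl_append, List.foldl_cons]
    rw [pv_block c (h c (by simp)) a]
    exact ih (fun x hx => h x (by simp [hx])) _

-- ===== VERDICT (by name: the statement is the Claim_ definition above) =====
theorem f_spec : Claim_equal_f := by
  intro n _ hpre
  simp only [Spec_f, f, f_alt]
  have hdig : ∀ c ∈ PySem.Int.toChars n, c ∈ pvDigits := by
    intro c hc
    rw [PySem.Int.toChars, if_neg (by unfold Pre_f at hpre; omega)] at hc
    exact pv_mem_toDigitsCore _ _ [] (by simp) c hc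
  rw [PySem.List.foldl_append_eq_flatMap, List.nil_append,
      pv_replace_single, pv_replace_single, pv_replace_single,
      List.map_map, List.map_map, List.map_flatMap]
  unfold pvParseBin2
  rw [pv_main _ hdig 0]
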